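-- pv_equiv track=rewrite | github.com/Alimohamad21/Online-Assesment-answers | main.py | secondHighestDigit
-- ===== SOURCE A (Python) =====
-- def secondHighestDigit(input):
--     nums = []
--     for char in input:
--         try:
--             nums.append(int(char))
--         except:
--             pass
--     if not nums or len(nums) == 1:
--         return -1
--     nums.sort()
--     return nums[-2]
-- ===== SOURCE B (Python) =====
-- def secondHighestDigit(input):
--     count = [0] * 10
--     for char in input:
--         try:
--             count[int(char)] += 1
--         except:
--             pass
--     total = 0
--     for d in range(9, -1, -1):
--         total += count[d]
--         if total >= 2:
--             return d
--     return -1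
-- ===== Notes on version B (the rewrite author's own statement) =====
-- stated objective: alternative
-- what changed: Replaces collecting all digits into a list, sorting it and taking nums[-2] with a fixed 10-bucket histogram plus a descending cumulative scan that returns the first digit at which two or more digits have been counted.
import Mathlib
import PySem

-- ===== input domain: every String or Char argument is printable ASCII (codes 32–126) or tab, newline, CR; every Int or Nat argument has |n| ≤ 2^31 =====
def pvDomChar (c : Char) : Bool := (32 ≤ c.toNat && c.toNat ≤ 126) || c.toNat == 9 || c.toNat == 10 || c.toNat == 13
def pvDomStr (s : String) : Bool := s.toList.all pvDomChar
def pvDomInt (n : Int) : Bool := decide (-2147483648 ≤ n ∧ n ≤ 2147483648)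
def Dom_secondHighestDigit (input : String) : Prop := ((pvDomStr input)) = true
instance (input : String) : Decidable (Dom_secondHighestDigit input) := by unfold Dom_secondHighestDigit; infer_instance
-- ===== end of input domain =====

-- B replaces "collect all digits, sort, take nums[-2]" by a 10-bucket digit histogram
-- followed by a descending cumulative scan (alternative algorithm; not measured faster).


-- ===== PORT A =====
-- nums = []; for char in input: try: nums.append(int(char)) except: pass
-- if not nums or len(nums) == 1: return -1
-- nums.sort(); return nums[-2]      (index -2 is always in range there, so pyGetD's default is unreachable)
def secondHighestDigit (input : String) : Int :=
  let nums := input.toList.foldl (fun acc c =>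
    match PySem.Int.ofChars? [c] with
    | some n => acc ++ [n]
    | none => acc) []
  if nums.length = 0 ∨ nums.length = 1 then -1
  else PySem.List.pyGetD (PySem.List.sorted nums (fun x => x) false) (-2) 0

-- ===== PORT B =====
-- the loop "for d in range(9, -1, -1): total += count[d]; if total >= 2: return d"
-- with its early return, as a countdown recursion on d; falls through to -1
def pvScanB (count : List Int) : Nat → Int → Int
  | 0, total => if 2 ≤ total + PySem.List.pyGetD count (0 : Int) 0 then 0 else -1
  | d + 1, total =>
      let t := total + PySem.List.pyGetD count ((d + 1 : Nat) : Int) 0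
      if 2 ≤ t then ((d + 1 : Nat) : Int) else pvScanB count d t

-- count = [0]*10; for char in input: try: count[int(char)] += 1 except: pass
-- (the bare except also swallows the IndexError an out-of-range index would cause: pyGet? = none there)
def secondHighestDigit_alt (input : String) : Int :=
  let count := input.toList.foldl (fun (cnt : List Int) c =>
    match PySem.Int.ofChars? [c] with
    | some n =>
      match PySem.List.pyGet? cnt n with
      | some v => PySem.List.pySetD cnt n (v + 1)
      | none => cnt
    | none => cnt) (List.replicate 10 (0 : Int))
  pvScanB count 9 0

-- ===== PRECONDITION & SPEC =====
def Spec_secondHighestDigit (input : String) (out : Int) : Prop := out = secondHighestDigit_alt input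
instance (input : String) (out : Int) : Decidable (Spec_secondHighestDigit input out) := by unfold Spec_secondHighestDigit; infer_instance

-- ===== CLAIM (what is proved, stated in full; the proofs are below) =====
def Claim_equal_secondHighestDigit : Prop := ∀ (input : String), Dom_secondHighestDigit input → Spec_secondHighestDigit input (secondHighestDigit input)

-- ===== LEMMAS AND PROOFS =====

-- the digits A collects, as a filterMap
def pvDigits (cs : List Char) : List Int := cs.filterMap (fun c => PySem.Int.ofChars? [c])

-- number of elements ≥ k
def pvCntGE (l : List Int) (k : Int) : Nat := l.countP (fun x => decide (k ≤ x))

-- B's counting loop, named so the lemmas below can speak about it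
def pvCountB (cs : List Char) (cnt : List Int) : List Int :=
  cs.foldl (fun (cnt : List Int) c =>
    match PySem.Int.ofChars? [c] with
    | some n =>
      match PySem.List.pyGet? cnt n with
      | some v => PySem.List.pySetD cnt n (v + 1)
      | none => cnt
    | none => cnt) cnt

lemma foldA_eq (cs : List Char) (acc : List Int) :
    cs.foldl (fun acc c =>
      match PySem.Int.ofChars? [c] with
      | some n => acc ++ [n]
      | none => acc) acc = acc ++ pvDigits cs := by
  induction cs generalizing acc with
  | nil => simp [pvDigits]
  | cons c cs ih =>
      simp only [List.foldl_cons, pvDigits, List.filterMap_cons]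
      cases h : PySem.Int.ofChars? [c] with
      | none => simpa [pvDigits] using ih acc
      | some n => simp [pvDigits, ih]

lemma digit_bound_aux :
    ((List.range 127).all (fun m =>
      (PySem.Int.ofChars? [Char.ofNat m]).elim true (fun n => decide (0 ≤ n ∧ n ≤ 9)))) = true := by
  decide

lemma digit_bounds {c : Char} (h : pvDomChar c = true) {n : Int}
    (hn : PySem.Int.ofChars? [c] = some n) : 0 ≤ n ∧ n ≤ 9 := by
  have hlt : c.toNat < 127 := by
    simp only [pvDomChar, Bool.or_eq_true, Bool.and_eq_true, decide_eq_true_eq, beq_iff_eq] at h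
    omega
  have hmem : c.toNat ∈ List.range 127 := List.mem_range.mpr hlt
  have := List.all_eq_true.mp digit_bound_aux _ hmem
  rw [Char.ofNat_toNat c, hn] at this
  simpa using this

lemma digits_bounds {cs : List Char} (h : cs.all pvDomChar = true) :
    ∀ x ∈ pvDigits cs, 0 ≤ x ∧ x ≤ 9 := by
  intro x hx
  obtain ⟨c, hc, hcx⟩ := List.mem_filterMap.mp hx
  exact digit_bounds (List.all_eq_true.mp h c hc) hcx

lemma countB_invariant (cs : List Char) (cnt : List Int)
    (hdom : cs.all pvDomChar = true) (hlen : cnt.length = 10) :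
    (pvCountB cs cnt).length = 10 ∧
    ∀ j : Nat, j < 10 →
      PySem.List.pyGetD (pvCountB cs cnt) (j : Int) 0
      = PySem.List.pyGetD cnt (j : Int) 0 + (((pvDigits cs).count (j : Int) : Nat) : Int) := by
  induction cs generalizing cnt with
  | nil => simp [pvCountB, pvDigits, hlen]
  | cons c cs ih =>
      simp only [List.all_cons, Bool.and_eq_true] at hdom
      obtain ⟨hc, hcs⟩ := hdom
      simp only [pvCountB, pvDigits, List.foldl_cons, List.filterMap_cons] at ih ⊢
      cases h : PySem.Int.ofChars? [c] with
      | none =>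
          dsimp only
          exact ih cnt hcs hlen
      | some n =>
          dsimp only
          obtain ⟨hn0, hn9⟩ := digit_bounds hc h
          have hnn : n = ((n.toNat : Nat) : Int) := (Int.toNat_of_nonneg hn0).symm
          have hlt : n.toNat < cnt.length := by omega
          have hget : PySem.List.pyGet? cnt n = cnt[n.toNat]? := by
            conv_lhs => rw [hnn]
            exact PySem.List.pyGet?_natCast cnt n.toNat
          rw [hget, List.getElem?_eq_getElem hlt]
          dsimp only
          obtain ⟨ihlen, ihget⟩ := ih (PySem.List.pySetD cnt n (cnt[n.toNat]'hlt + 1)) hcs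
            (by rw [PySem.List.length_pySetD]; exact hlen)
          refine ⟨ihlen, ?_⟩
          intro j hj
          rw [ihget j hj]
          have hset := PySem.List.pyGetD_pySetD_natCast cnt n.toNat j (cnt[n.toNat]'hlt + 1) 0 hlt
          rw [← hnn] at hset
          rw [hset]
          have hv : PySem.List.pyGetD cnt ((n.toNat : Nat) : Int) 0 = cnt[n.toNat]'hlt := by
            rw [PySem.List.pyGetD, PySem.List.pyGet?_natCast, List.getElem?_eq_getElem hlt]
            rfl
          by_cases hjn : j = n.toNat
          · subst hjn
            rw [← hnn] at hv ⊢
            simp [hv]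
            omega
          · have hje : ¬ (n = ((j : Nat) : Int)) := by
              rw [hnn]; exact_mod_cast fun e => hjn (by exact_mod_cast e.symm)
            simp only [if_neg hjn, List.count_cons, beq_iff_eq, if_neg hje]
            push_cast
            ring

lemma cntGE_succ (l : List Int) (k : Int) :
    pvCntGE l k = pvCntGE l (k + 1) + l.count k := by
  induction l with
  | nil => simp [pvCntGE]
  | cons a l ih =>
      simp only [pvCntGE, List.countP_cons, List.count_cons, decide_eq_true_eq, beq_iff_eq] at ih ⊢
      split_ifs <;> omega

-- cntGE_succ with both bounds written as casts of naturals (the form the scan lemmas use)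
lemma cntGE_succ' (l : List Int) (m : Nat) :
    pvCntGE l ((m : Nat) : Int) = pvCntGE l (((m + 1 : Nat)) : Int) + l.count ((m : Nat) : Int) := by
  have hcast : (((m + 1 : Nat)) : Int) = ((m : Nat) : Int) + 1 := by exact_mod_cast rfl
  rw [hcast]
  exact cntGE_succ l (m : Int)

lemma cntGE_zero_of_le {l : List Int} (hb : ∀ x ∈ l, x ≤ 9) :
    pvCntGE l 10 = 0 := by
  refine List.countP_eq_zero.mpr ?_
  intro x hx
  simpa using by have := hb x hx; omega

-- the scan returns a, the largest value with at least two digits ≥ a, once d has counted down to ≥ a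
lemma scan_correct (count L : List Int)
    (hc : ∀ j : Nat, j < 10 → PySem.List.pyGetD count ((j : Nat) : Int) 0 = ((L.count ((j : Nat) : Int) : Nat) : Int))
    (a : Int) (ha0 : 0 ≤ a) (h2 : 2 ≤ pvCntGE L a)
    (h1 : ∀ j : Int, a < j → pvCntGE L j ≤ 1) :
    ∀ d : Nat, a ≤ (d : Int) → d ≤ 9 → ∀ total : Int,
      total = (pvCntGE L (((d + 1 : Nat)) : Int) : Int) → pvScanB count d total = a := by
  intro d
  induction d with
  | zero =>
      intro had _ total ht
      have ha : a = 0 := le_antisymm (by exact_mod_cast had) ha0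
      subst ha
      have h0 := hc 0 (by omega)
      have hsum := cntGE_succ' L 0
      norm_num at h0 hsum ht
      have hge : (2 : Int) ≤ total + PySem.List.pyGetD count (0 : Int) 0 := by
        rw [ht, h0]
        exact_mod_cast by omega
      simp [pvScanB, hge]
  | succ d ih =>
      intro had hd9 total ht
      have hc' := hc (d + 1) (by omega)
      have hsum := cntGE_succ' L (d + 1)
      have htot : total + PySem.List.pyGetD count ((d + 1 : Nat) : Int) 0
          = (pvCntGE L (((d + 1 : Nat)) : Int) : Int) := by
        rw [ht, hc']
        exact_mod_cast by omega
      by_cases hcase : a = ((d + 1 : Nat) : Int)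
      · have h2' : (2 : Int) ≤ total + PySem.List.pyGetD count ((d + 1 : Nat) : Int) 0 := by
          rw [htot, ← hcase]
          exact_mod_cast h2
        simp only [pvScanB]
        rw [if_pos h2']
        exact hcase.symm
      · have hlt : a ≤ (d : Int) := by push_cast at had hcase; omega
        have hsmall : pvCntGE L (((d + 1 : Nat)) : Int) ≤ 1 := h1 _ (by push_cast; omega)
        have hno : ¬ (2 : Int) ≤ total + PySem.List.pyGetD count ((d + 1 : Nat) : Int) 0 := by
          rw [htot]; exact_mod_cast by omega
        simp only [pvScanB, hno, if_false]
        exact ih hlt (by omega) _ (by rw [htot])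

-- with at most one digit in total the scan falls through to -1
lemma scan_miss (count L : List Int)
    (hc : ∀ j : Nat, j < 10 → PySem.List.pyGetD count ((j : Nat) : Int) 0 = ((L.count ((j : Nat) : Int) : Nat) : Int))
    (hsmall : ∀ j : Int, pvCntGE L j ≤ 1) :
    ∀ d : Nat, d ≤ 9 → ∀ total : Int,
      total = (pvCntGE L (((d + 1 : Nat)) : Int) : Int) → pvScanB count d total = -1 := by
  intro d
  induction d with
  | zero =>
      intro _ total ht
      have h0 := hc 0 (by omega)
      have hsum := cntGE_succ' L 0
      norm_num at h0 hsum ht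
      have hno : ¬ (2 : Int) ≤ total + PySem.List.pyGetD count (0 : Int) 0 := by
        rw [ht, h0]
        exact_mod_cast by have := hsmall 0; omega
      simp [pvScanB, hno]
  | succ d ih =>
      intro hd9 total ht
      have hc' := hc (d + 1) (by omega)
      have hsum := cntGE_succ' L (d + 1)
      have htot : total + PySem.List.pyGetD count ((d + 1 : Nat) : Int) 0
          = (pvCntGE L (((d + 1 : Nat)) : Int) : Int) := by
        rw [ht, hc']
        exact_mod_cast by omega
      have hno : ¬ (2 : Int) ≤ total + PySem.List.pyGetD count ((d + 1 : Nat) : Int) 0 := by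
        rw [htot]; exact_mod_cast by have := hsmall (((d + 1 : Nat)) : Int); omega
      simp only [pvScanB, hno, if_false]
      exact ih (by omega) _ (by rw [htot])

-- nums[-2] on a list of length ≥ 2
lemma pyGetD_neg_two {s : List Int} (h : 2 ≤ s.length) :
    PySem.List.pyGetD s (-2) 0 = s[s.length - 2]'(by omega) := by
  have h1 : ¬ ((0 : Int) ≤ -2) := by omega
  have h2 : -(s.length : Int) ≤ -2 := by omega
  simp only [PySem.List.pyGetD, PySem.List.pyGet?, PySem.List.pyIdx?, if_neg h1, if_pos h2,
    show (-(-2 : Int)).toNat = 2 from by decide, Option.bind_some,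
    List.getElem?_eq_getElem (show s.length - 2 < s.length from by omega), Option.getD_some]

theorem secondHighestDigit_spec : Claim_equal_secondHighestDigit := by
  intro input hdom
  have hdom' : input.toList.all pvDomChar = true := hdom
  show secondHighestDigit input = secondHighestDigit_alt input
  simp only [secondHighestDigit, secondHighestDigit_alt]
  rw [foldA_eq]
  simp only [List.nil_append]
  have hbnd := digits_bounds hdom'
  obtain ⟨hlen10, hget⟩ := countB_invariant input.toList (List.replicate 10 (0 : Int)) hdom' (by simp)
  have hc : ∀ j : Nat, j < 10 →
      PySem.List.pyGetD (pvCountB input.toList (List.replicate 10 (0 : Int))) ((j : Nat) : Int) 0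
        = (((pvDigits input.toList).count ((j : Nat) : Int) : Nat) : Int) := by
    intro j hj
    rw [hget j hj]
    have hz : PySem.List.pyGetD (List.replicate 10 (0 : Int)) ((j : Nat) : Int) 0 = 0 := by
      rw [PySem.List.pyGetD, PySem.List.pyGet?_natCast,
        List.getElem?_eq_getElem (by simpa using hj : j < (List.replicate 10 (0 : Int)).length)]
      simp only [Option.getD_some, List.getElem_replicate]
    rw [hz, zero_add]
  have h10 : pvCntGE (pvDigits input.toList) (((9 + 1 : Nat)) : Int) = 0 := by
    have he : (((9 + 1 : Nat)) : Int) = (10 : Int) := by norm_num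
    rw [he]
    exact cntGE_zero_of_le (fun x hx => (hbnd x hx).2)
  by_cases hlen : (pvDigits input.toList).length = 0 ∨ (pvDigits input.toList).length = 1
  · rw [if_pos hlen]
    have hsmall : ∀ j : Int, pvCntGE (pvDigits input.toList) j ≤ 1 := by
      intro j
      have h1 : (pvDigits input.toList).length ≤ 1 := by rcases hlen with h | h <;> omega
      exact le_trans List.countP_le_length h1
    exact (scan_miss _ _ hc hsmall 9 (by omega) 0 (by exact_mod_cast h10.symm)).symm
  · rw [if_neg hlen]
    simp only [not_or] at hlen
    have hn2 : 2 ≤ (pvDigits input.toList).length := by omega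
    set L := pvDigits input.toList with hL
    set s := PySem.List.sorted L (fun x => x) false with hs
    have hperm : s.Perm L := PySem.List.sorted_perm L _ false
    have hslen : s.length = L.length := hperm.length_eq
    have hsl2 : 2 ≤ s.length := by omega
    rw [pyGetD_neg_two hsl2]
    set a := s[s.length - 2]'(by omega) with ha
    have hamem : a ∈ L := hperm.mem_iff.mp (List.getElem_mem _)
    obtain ⟨ha0, ha9⟩ := hbnd a hamem
    have hcnt_eq : ∀ j : Int, pvCntGE L j = pvCntGE s j :=
      fun j => (hperm.countP_eq _).symm
    have hlast : a ≤ s[s.length - 1]'(by omega) :=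
      PySem.List.sorted_id_getElem_mono L (by omega) (by rw [← hs]; omega)
    have hdrop : s.drop (s.length - 2) = [a, s[s.length - 1]'(by omega)] := by
      rw [List.drop_eq_getElem_cons (by omega : s.length - 2 < s.length)]
      rw [List.drop_eq_getElem_cons (by omega : s.length - 2 + 1 < s.length)]
      have e1 : s.length - 2 + 1 = s.length - 1 := by omega
      have e3 : s.length - 1 + 1 = s.length := by omega
      simp only [e1, e3, List.drop_length]
      rw [ha]
    have h2 : 2 ≤ pvCntGE L a := by
      rw [hcnt_eq]
      conv_rhs => rw [show s = s.take (s.length - 2) ++ s.drop (s.length - 2) from (List.take_append_drop _ _).symm]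
      rw [pvCntGE, List.countP_append, hdrop]
      have hcP : List.countP (fun x => decide (a ≤ x)) [a, s[s.length - 1]'(by omega)] = 2 := by
        simp [hlast]
      rw [hcP]
      omega
    have hdrop1 : s.drop (s.length - 1) = [s[s.length - 1]'(by omega)] := by
      rw [List.drop_eq_getElem_cons (by omega : s.length - 1 < s.length)]
      have e1 : s.length - 1 + 1 = s.length := by omega
      simp only [e1, List.drop_length]
    have h1 : ∀ j : Int, a < j → pvCntGE L j ≤ 1 := by
      intro j hj
      rw [hcnt_eq]
      conv_lhs => rw [show s = s.take (s.length - 1) ++ s.drop (s.length - 1) from (List.take_append_drop _ _).symm]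
      rw [pvCntGE, List.countP_append, hdrop1]
      have hz : List.countP (fun x => decide (j ≤ x)) (s.take (s.length - 1)) = 0 := by
        refine List.countP_eq_zero.mpr ?_
        intro x hx
        obtain ⟨i, hm, rfl⟩ := List.mem_take_iff_getElem.mp hx
        have hi : i ≤ s.length - 2 := by omega
        have hile : s[i]'(by omega) ≤ a :=
          PySem.List.sorted_id_getElem_mono L hi (by rw [← hs]; omega)
        simp only [decide_eq_true_eq]
        omega
      have hone : List.countP (fun x => decide (j ≤ x)) [s[s.length - 1]'(by omega)] ≤ 1 := by
        simp only [List.countP_cons, List.countP_nil]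
        split_ifs <;> omega
      omega
    exact (scan_correct _ L hc a ha0 h2 h1 9 (by exact_mod_cast ha9) (by omega) 0
      (by exact_mod_cast h10.symm)).symm
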